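-- pv_equiv track=rewrite | github.com/yourshishi/qaOffer | python_wt.py | sortABC
-- ===== SOURCE A (Python) =====
-- def sortABC(s):
--     if len(s) <= 1:
--         return [s]
--     total = []
--     lens = len(s)
--     for i in range(lens):
--         total.append(s[i])
--         for j in range(i + 1, lens):
--             total.append(s[i:j+1])    ##因为j只能到lens -1，所以需要j+1来取到最后一个数
--     return sorted(total, key=lambda i: len(i), reverse=False)
-- ===== SOURCE B (Python) =====
-- def sortABC(s):
--     if len(s) <= 1:
--         return [s]
--     out = []
--     n = len(s)
--     for L in range(1, n + 1):
--         for i in range(n - L + 1):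
--             out.append(s[i:i+L])
--     return out
-- ===== Notes on version B (the rewrite author's own statement) =====
-- stated objective: simpler
-- what changed: B emits substrings directly in length-major, then start-index order, so the sort of A is eliminated entirely.
import Mathlib
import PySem

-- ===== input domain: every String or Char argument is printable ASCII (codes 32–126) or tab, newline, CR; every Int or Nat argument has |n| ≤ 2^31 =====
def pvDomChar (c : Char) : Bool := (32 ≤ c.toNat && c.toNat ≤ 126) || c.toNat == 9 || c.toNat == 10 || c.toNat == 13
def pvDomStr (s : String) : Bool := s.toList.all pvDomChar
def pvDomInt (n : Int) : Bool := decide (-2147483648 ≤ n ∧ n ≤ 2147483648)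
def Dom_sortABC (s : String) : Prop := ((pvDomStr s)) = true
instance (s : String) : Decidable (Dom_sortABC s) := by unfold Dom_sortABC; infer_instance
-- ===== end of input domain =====

-- B emits the substrings directly in length-major, then start-index order, so A's stable sort by length is eliminated; same return values.


-- ===== PORT A =====
-- total.append(s[i]): i is always in range in A's loop, so the IndexError case is unreachable; pyGetD's default is never read
def sortABC (s : String) : List String :=
  if PySem.Str.len s ≤ 1 then [s]
  else
    let lens : Int := PySem.Str.len s
    let total : List String :=
      (PySem.List.pyRange 0 lens 1).foldl (fun total i =>
        let total := total ++ [String.ofList [PySem.List.pyGetD s.toList i ' ']]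
        (PySem.List.pyRange (i + 1) lens 1).foldl (fun total j =>
          total ++ [String.ofList (PySem.List.slice s.toList (some i) (some (j + 1)))]) total) []
    PySem.List.sorted total (fun t => PySem.Str.len t) false

-- ===== PORT B =====
def sortABC_alt (s : String) : List String :=
  if PySem.Str.len s ≤ 1 then [s]
  else
    let n : Int := PySem.Str.len s
    (PySem.List.pyRange 1 (n + 1) 1).foldl (fun out L =>
      (PySem.List.pyRange 0 (n - L + 1) 1).foldl (fun out i =>
        out ++ [String.ofList (PySem.List.slice s.toList (some i) (some (i + L)))]) out) []

-- ===== PRECONDITION & SPEC =====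
def Spec_sortABC (s : String) (out : List String) : Prop := out = sortABC_alt s
instance (s : String) (out : List String) : Decidable (Spec_sortABC s out) := by unfold Spec_sortABC; infer_instance

-- ===== CLAIM (what is proved, stated in full; the proofs are below) =====
def Claim_equal_sortABC : Prop := ∀ (s : String), Dom_sortABC s → Spec_sortABC s (sortABC s)

-- ===== LEMMAS AND PROOFS =====
def sub (cs : List Char) (i L : Nat) : String := String.ofList ((cs.drop i).take L)

theorem flatMap_singleton_eq_map {α β : Type} (l : List α) (f : α → β) :
    List.flatMap (fun a => [f a]) l = l.map f := by
  induction l with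
  | nil => rfl
  | cons a l ih => simp [List.flatMap_cons, ih]

theorem B_norm (s : String) (h2 : 2 ≤ s.toList.length) :
    sortABC_alt s = (List.range s.toList.length).flatMap
      (fun k => (List.range (s.toList.length - k)).map (fun i => sub s.toList i (k + 1))) := by
  unfold sortABC_alt
  rw [if_neg (by simp [← String.length_toList]; omega)]
  simp only [PySem.List.foldl_append_singleton_eq_map, PySem.List.foldl_append_eq_flatMap,
    List.nil_append, PySem.Str.len_eq]
  rw [PySem.List.pyRange_one 1 (s.toList.length + 1)]
  have h1 : ((s.toList.length : Int) + 1 - 1).toNat = s.toList.length := by omega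
  rw [h1, List.flatMap_map]
  refine List.flatMap_congr (fun k hk => ?_)
  have hkn : k < s.toList.length := List.mem_range.mp hk
  have h3 : ((s.toList.length : Int) - (1 + (k : Int)) + 1) = ((s.toList.length - k : Nat) : Int) := by omega
  rw [h3, PySem.List.pyRange_zero_nat, List.map_map]
  refine List.map_congr_left (fun i hi => ?_)
  simp only [Function.comp]
  rw [PySem.List.slice_toNat _ (by positivity) (by positivity)]
  have h4 : ((i : Int) + (1 + (k : Int))).toNat - (i : Int).toNat = k + 1 := by omega
  rw [h4]
  simp [sub]

theorem A_norm (s : String) (h2 : 2 ≤ s.toList.length) :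
    sortABC s = PySem.List.sorted
      ((List.range s.toList.length).flatMap
        (fun a => (List.range (s.toList.length - a)).map (fun t => sub s.toList a (t + 1))))
      (fun t => PySem.Str.len t) false := by
  unfold sortABC
  rw [if_neg (by simp [← String.length_toList]; omega)]
  simp only [PySem.List.foldl_append_singleton_eq_map]
  congr 1
  have hb : ∀ (acc : List String) (i : Int),
      (acc ++ [String.ofList [PySem.List.pyGetD s.toList i ' ']]) ++
        (PySem.List.pyRange (i + 1) (PySem.Str.len s) 1).map
          (fun j => String.ofList (PySem.List.slice s.toList (some i) (some (j + 1))))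
      = acc ++ (String.ofList [PySem.List.pyGetD s.toList i ' '] ::
        (PySem.List.pyRange (i + 1) (PySem.Str.len s) 1).map
          (fun j => String.ofList (PySem.List.slice s.toList (some i) (some (j + 1))))) := by
    intro acc i; simp
  simp only [hb, PySem.List.foldl_append_eq_flatMap, List.nil_append]
  have hlen : PySem.Str.len s = ((s.toList.length : Nat) : Int) := by
    simp [← String.length_toList]
  rw [hlen, PySem.List.pyRange_zero_nat, List.flatMap_map]
  refine List.flatMap_congr (fun a ha => ?_)
  have han : a < s.toList.length := List.mem_range.mp ha
  -- head element: s[a] as a 1-char string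
  have hhead : String.ofList [PySem.List.pyGetD s.toList (a : Int) ' '] = sub s.toList a 1 := by
    rw [PySem.List.pyGetD_natCast, List.getD_eq_getElem _ _ han]
    unfold sub
    rw [List.drop_eq_getElem_cons han]
    rfl
  -- tail elements
  have h3 : ((s.toList.length : Int) - ((a : Int) + 1)).toNat = s.toList.length - a - 1 := by omega
  rw [PySem.List.pyRange_one ((a : Int) + 1), h3]
  rw [List.map_map]
  have htail : ∀ k ∈ List.range (s.toList.length - a - 1),
      ((fun j => String.ofList (PySem.List.slice s.toList (some (a : Int)) (some (j + 1)))) ∘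
        (fun (k : Nat) => (a : Int) + 1 + (k : Int))) k = sub s.toList a (k + 2) := by
    intro k hk
    simp only [Function.comp_apply]
    rw [PySem.List.slice_toNat _ (by positivity) (by positivity)]
    have h4 : ((a : Int) + 1 + (k : Int) + 1).toNat - ((a : Int)).toNat = k + 2 := by omega
    rw [h4]; rfl
  rw [List.map_congr_left htail]
  rw [hhead]
  have h5 : s.toList.length - a = (s.toList.length - a - 1) + 1 := by omega
  rw [h5, List.range_succ_eq_map, List.map_cons, List.map_map]
  simp [Nat.succ_eq_add_one, Function.comp]

theorem range_filter_beq (m L : Nat) :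
    (List.range m).filter (fun t => t == L) = if L < m then [L] else [] := by
  induction m with
  | zero => simp
  | succ m ih =>
    rw [List.range_succ, List.filter_append, ih]
    by_cases h : L < m
    · rw [if_pos h, if_pos (by omega)]
      have : (List.filter (fun t => t == L) [m]) = [] := by simp; omega
      rw [this, List.append_nil]
    · by_cases h' : m = L
      · subst h'; simp
      · rw [if_neg h, if_neg (by omega)]
        simp [h']

theorem len_sub (cs : List Char) (a t : Nat) (h : t < cs.length - a) :
    PySem.Str.len (sub cs a (t + 1)) = ((t + 1 : Nat) : Int) := by
  simp [sub]
  omega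

theorem filter_total (cs : List Char) (L : Nat) (hL : L < cs.length) :
    ((List.range cs.length).flatMap
        (fun a => (List.range (cs.length - a)).map (fun t => sub cs a (t + 1)))).filter
      (fun x => decide (PySem.Str.len x = ((L + 1 : Nat) : Int)))
    = (List.range (cs.length - L)).map (fun i => sub cs i (L + 1)) := by
  rw [List.filter_flatMap]
  have hgrp : ∀ a ∈ List.range cs.length,
      ((List.range (cs.length - a)).map (fun t => sub cs a (t + 1))).filter
        (fun x => decide (PySem.Str.len x = ((L + 1 : Nat) : Int)))
      = if L < cs.length - a then [sub cs a (L + 1)] else [] := by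
    intro a ha
    rw [List.filter_map]
    rw [List.filter_congr (q := fun t => t == L) (fun t ht => by
      simp only [Function.comp_apply]
      rw [len_sub cs a t (List.mem_range.mp ht)]
      have hiff : (((t + 1 : Nat) : Int) = ((L + 1 : Nat) : Int)) ↔ t = L := by
        constructor <;> intro h <;> omega
      simp [hiff]
      by_cases h : t = L <;> simp [h])]
    rw [range_filter_beq]
    by_cases h : L < cs.length - a
    · rw [if_pos h, if_pos h]; rfl
    · rw [if_neg h, if_neg h]; rfl
  rw [List.flatMap_congr hgrp]
  have hsplit : List.range cs.length = List.range ((cs.length - L) + L) := by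
    congr 1; omega
  rw [hsplit, List.range_add, List.flatMap_append]
  have h1 : (List.range (cs.length - L)).flatMap
      (fun a => if L < cs.length - a then [sub cs a (L + 1)] else [])
      = (List.range (cs.length - L)).map (fun i => sub cs i (L + 1)) := by
    rw [List.flatMap_congr (g := fun a => [sub cs a (L + 1)]) (fun a ha => by
      rw [if_pos (by have := List.mem_range.mp ha; omega)])]
    exact flatMap_singleton_eq_map _ _
  have h2 : ((List.range L).map (fun x => (cs.length - L) + x)).flatMap
      (fun a => if L < cs.length - a then [sub cs a (L + 1)] else []) = [] := by
    rw [List.flatMap_map]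
    rw [List.flatMap_congr (g := fun _ => ([] : List String)) (fun x hx => by
      simp only [Function.comp_apply]
      rw [if_neg (by omega)])]
    simp
  rw [h1, h2, List.append_nil]


theorem insertBy_append_skip {α : Type} (key : α → Int) (x : α) (A l : List α)
    (h : ∀ a ∈ A, ¬ key x < key a) :
    PySem.List.insertBy (fun a b => decide (key a < key b)) x (A ++ l)
      = A ++ PySem.List.insertBy (fun a b => decide (key a < key b)) x l := by
  induction A with
  | nil => simp
  | cons a A ih =>
    simp only [List.cons_append, PySem.List.insertBy]
    rw [if_neg (by simpa using h a (by simp)), ih (fun b hb => h b (by simp [hb]))]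

theorem insertBy_front {α : Type} (key : α → Int) (x : α) (l : List α)
    (h : ∀ y ∈ l, key x < key y) :
    PySem.List.insertBy (fun a b => decide (key a < key b)) x l = x :: l := by
  cases l with
  | nil => simp [PySem.List.insertBy]
  | cons y ys => simp [PySem.List.insertBy, h y (by simp)]

theorem insertBy_flatMap {α : Type} (key : α → Int) (x : α) (ks : List Int) (F : Int → List α)
    (hp : ks.Pairwise (· < ·))
    (hF : ∀ k ∈ ks, ∀ y ∈ F k, key y = k)
    (hx : key x ∈ ks) :
    PySem.List.insertBy (fun a b => decide (key a < key b)) x (ks.flatMap F)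
      = ks.flatMap (fun k => if k = key x then F k ++ [x] else F k) := by
  induction ks with
  | nil => simp at hx
  | cons k rest ih =>
    simp only [List.flatMap_cons]
    by_cases hk : k = key x
    · subst hk
      rw [insertBy_append_skip key x (F (key x)) _
          (fun a ha => by rw [hF (key x) (by simp) a ha]; omega)]
      rw [insertBy_front key x _ (fun y hy => by
        obtain ⟨k', hk', hy'⟩ := List.mem_flatMap.mp hy
        rw [hF k' (by simp [hk']) y hy']
        exact (List.pairwise_cons.mp hp).1 k' hk')]
      have hrest : List.flatMap (fun k => if k = key x then F k ++ [x] else F k) rest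
          = List.flatMap F rest := by
        refine List.flatMap_congr (fun k' hk' => ?_)
        rw [if_neg]
        intro h
        exact absurd ((List.pairwise_cons.mp hp).1 k' hk') (by rw [h]; omega)
      rw [if_pos rfl, hrest]
      simp
    · have hxr : key x ∈ rest := by
        rcases List.mem_cons.mp hx with h | h
        · exact absurd h.symm hk
        · exact h
      have hklt : k < key x := (List.pairwise_cons.mp hp).1 _ hxr
      rw [insertBy_append_skip key x (F k) _
          (fun a ha => by rw [hF k (by simp) a ha]; omega)]
      rw [ih (List.pairwise_cons.mp hp).2 (fun k' h1 y h2 => hF k' (by simp [h1]) y h2) hxr]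
      rw [if_neg hk]

theorem sorted_eq_flatMap_filter {α : Type} (xs : List α) (key : α → Int) (ks : List Int)
    (hp : ks.Pairwise (· < ·)) (hmem : ∀ x ∈ xs, key x ∈ ks) :
    PySem.List.sorted xs key false
      = ks.flatMap (fun k => xs.filter (fun x => decide (key x = k))) := by
  rw [PySem.List.sorted_eq_foldl_insertBy]
  induction xs using List.reverseRecOn with
  | nil => simp
  | append_singleton xs x ih =>
    rw [List.foldl_append, List.foldl_cons, List.foldl_nil,
      ih (fun y hy => hmem y (by simp [hy]))]
    rw [insertBy_flatMap key x ks _ hp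
        (fun k _ y hy => by simpa using (List.mem_filter.mp hy).2)
        (hmem x (by simp))]
    refine List.flatMap_congr (fun k hk => ?_)
    rw [List.filter_append]
    by_cases h : k = key x
    · simp [h]
    · rw [if_neg h]
      have : (List.filter (fun y => decide (key y = k)) [x]) = [] := by
        simp; intro hh; exact h hh.symm
      rw [this, List.append_nil]

-- ===== VERDICT (by name: the statement is the Claim_ definition above) =====
theorem sortABC_spec : Claim_equal_sortABC := by
  intro s _
  unfold Spec_sortABC
  by_cases h : s.toList.length ≤ 1
  · unfold sortABC sortABC_alt
    rw [if_pos (by simp [← String.length_toList]; omega), if_pos (by simp [← String.length_toList]; omega)]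
  · have h2 : 2 ≤ s.toList.length := by omega
    rw [A_norm s h2, B_norm s h2]
    rw [sorted_eq_flatMap_filter _ _ ((List.range s.toList.length).map (fun L => ((L + 1 : Nat) : Int)))
      (List.pairwise_map.mpr ((List.pairwise_lt_range).imp (by intro a b hab; push_cast; omega)))
      (by
        intro x hx
        obtain ⟨a, ha, hx⟩ := List.mem_flatMap.mp hx
        obtain ⟨t, ht, rfl⟩ := List.mem_map.mp hx
        rw [len_sub s.toList a t (List.mem_range.mp ht)]
        exact List.mem_map.mpr ⟨t, List.mem_range.mpr (by
          have := List.mem_range.mp ht; have := List.mem_range.mp ha; omega), rfl⟩)]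
    rw [List.flatMap_map]
    refine List.flatMap_congr (fun L hL => ?_)
    exact filter_total s.toList L (List.mem_range.mp hL)
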